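-- pv_equiv track=rewrite | github.com/dave322942780/AlgoLand | max_range_less_than.py | solution
-- ===== SOURCE A (Python) =====
-- def solution(lst):
--     min_left = lst[:]
--     max_right = lst[:]
--
--     for i in range(1, len(min_left)):
--         min_left[i] = min(min_left[i - 1], min_left[i])
--
--     for i in range(len(max_right) - 2, -1, -1):
--         max_right[i] = max(max_right[i + 1], max_right[i])
--
--     i = j = 0
--
--     max_range = 0
--     max_range_indices = None
--
--     while i < len(lst) and j < len(lst):
--         if min_left[i] < max_right[j]:
--             if (j - i) > max_range:
--                 max_range = j - i
--                 max_range_indices = i, j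
--             j += 1
--         else:
--             i += 1
--
--     return max_range_indices
-- ===== SOURCE B (Python) =====
-- def solution(lst):
--     n = len(lst)
--     min_left = lst[:]
--     max_right = lst[:]
--
--     for i in range(1, n):
--         min_left[i] = min(min_left[i - 1], min_left[i])
--
--     for i in range(n - 2, -1, -1):
--         max_right[i] = max(max_right[i + 1], max_right[i])
--
--     best = 0
--     best_indices = None
--     for j in range(n):
--         v = max_right[j]
--         lo, hi = 0, j
--         while lo < hi:
--             mid = (lo + hi) // 2
--             if min_left[mid] < v:
--                 hi = mid
--             else:
--                 lo = mid + 1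
--         if lo < j and j - lo > best:
--             best = j - lo
--             best_indices = (lo, j)
--     return best_indices
-- ===== Notes on version B (the rewrite author's own statement) =====
-- stated objective: alternative
-- what changed: Replaces A's two-pointer simultaneous sweep with an independent loop over each right index j that binary-searches the non-increasing prefix-min array for the first index with min_left[i] < max_right[j], keeping the same prefix-min/suffix-max precomputation.
import Mathlib
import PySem

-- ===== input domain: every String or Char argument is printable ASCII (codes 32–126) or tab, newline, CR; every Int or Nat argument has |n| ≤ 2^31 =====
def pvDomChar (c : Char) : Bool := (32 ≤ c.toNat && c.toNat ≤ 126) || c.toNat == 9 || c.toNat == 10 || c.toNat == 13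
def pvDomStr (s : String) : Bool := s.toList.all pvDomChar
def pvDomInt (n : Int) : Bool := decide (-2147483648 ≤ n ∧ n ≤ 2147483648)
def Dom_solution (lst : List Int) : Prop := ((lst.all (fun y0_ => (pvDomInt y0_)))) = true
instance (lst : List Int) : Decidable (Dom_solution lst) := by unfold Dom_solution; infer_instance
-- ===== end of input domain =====

-- B keeps A's prefix-min/suffix-max precomputation but replaces the two-pointer sweep
-- by a per-j binary search on the monotone prefix-min array (alternative algorithm,
-- equivalence of the returned value is proved; not faster).

-- ===== PORT A =====
-- `for i in range(1, len(a)): a[i] = min(a[i-1], a[i])`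
def fwdLoop (a : List Int) (i : Nat) : List Int :=
  if i < a.length then
    fwdLoop (a.set i (min (a.getD (i - 1) 0) (a.getD i 0))) (i + 1)
  else a
termination_by a.length - i
decreasing_by simp [List.length_set]; omega

-- `for i in range(len(a) - 2, -1, -1): a[i] = max(a[i+1], a[i])`
def bwdLoop (a : List Int) (i : Int) : List Int :=
  if 0 ≤ i then
    bwdLoop (a.set i.toNat (max (a.getD (i.toNat + 1) 0) (a.getD i.toNat 0))) (i - 1)
  else a
termination_by (i + 1).toNat
decreasing_by omega

-- the `while i < len(lst) and j < len(lst)` two-pointer loop of A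
def whileA (lst ml mr : List Int) (i j : Nat) (mx : Int) (ind : Option (Int × Int)) :
    Option (Int × Int) :=
  if i < lst.length ∧ j < lst.length then
    if ml.getD i 0 < mr.getD j 0 then
      if ((j : Int) - (i : Int)) > mx then
        whileA lst ml mr i (j + 1) ((j : Int) - (i : Int)) (some ((i : Int), (j : Int)))
      else
        whileA lst ml mr i (j + 1) mx ind
    else
      whileA lst ml mr (i + 1) j mx ind
  else ind
termination_by (lst.length - i) + (lst.length - j)
decreasing_by all_goals omega

def solution (lst : List Int) : Option (Int × Int) :=
  let min_left := fwdLoop lst 1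
  let max_right := bwdLoop lst ((lst.length : Int) - 2)
  whileA lst min_left max_right 0 0 0 none

-- ===== PORT B =====
-- `while lo < hi: mid = (lo+hi)//2; if ml[mid] < v: hi = mid else: lo = mid+1`
def bsearch (ml : List Int) (v : Int) (lo hi : Nat) : Nat :=
  if lo < hi then
    let mid := (lo + hi) / 2
    if ml.getD mid 0 < v then bsearch ml v lo mid else bsearch ml v (mid + 1) hi
  else lo
termination_by hi - lo
decreasing_by all_goals omega

-- body of B's `for j in range(n)` loop; state = (best, best_indices)
def stepB (ml mr : List Int) (st : Int × Option (Int × Int)) (j : Nat) :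
    Int × Option (Int × Int) :=
  let v := mr.getD j 0
  let lo := bsearch ml v 0 j
  if lo < j ∧ ((j : Int) - (lo : Int)) > st.1 then
    (((j : Int) - (lo : Int)), some ((lo : Int), (j : Int)))
  else st

def solution_alt (lst : List Int) : Option (Int × Int) :=
  let min_left := fwdLoop lst 1
  let max_right := bwdLoop lst ((lst.length : Int) - 2)
  ((List.range lst.length).foldl (stepB min_left max_right) (0, none)).2

-- ===== PRECONDITION & SPEC =====
def Spec_solution (lst : List Int) (out : Option (Int × Int)) : Prop := out = solution_alt lst
instance (lst : List Int) (out : Option (Int × Int)) : Decidable (Spec_solution lst out) := by unfold Spec_solution; infer_instance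

-- ===== CLAIM (what is proved, stated in full; the proofs are below) =====
def Claim_equal_solution : Prop := ∀ (lst : List Int), Dom_solution lst → Spec_solution lst (solution lst)

-- ===== LEMMAS AND PROOFS =====

theorem getD_set_self (l : List Int) (i : Nat) (v : Int) (h : i < l.length) :
    (l.set i v).getD i 0 = v := by
  simp [List.getD_eq_getElem?_getD, h]

theorem getD_set_ne (l : List Int) (i j : Nat) (v : Int) (h : i ≠ j) :
    (l.set i v).getD j 0 = l.getD j 0 := by
  simp [List.getD_eq_getElem?_getD, List.getElem?_set_ne, h]

theorem fwdLoop_length (a : List Int) (i : Nat) : (fwdLoop a i).length = a.length := by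
  fun_induction fwdLoop a i with
  | case1 a i h ih => rw [ih, List.length_set]
  | case2 a i h => rfl

theorem bwdLoop_length (a : List Int) (i : Int) : (bwdLoop a i).length = a.length := by
  fun_induction bwdLoop a i with
  | case1 a i h ih => rw [ih, List.length_set]
  | case2 a i h => rfl

-- the prefix-min array is adjacent-antitone
theorem fwdLoop_anti (a : List Int) (i : Nat) :
    (∀ k, 0 < k → k < i → k < a.length → a.getD k 0 ≤ a.getD (k - 1) 0) →
    ∀ k, k + 1 < a.length → (fwdLoop a i).getD (k + 1) 0 ≤ (fwdLoop a i).getD k 0 := by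
  fun_induction fwdLoop a i with
  | case1 a i hlt ih =>
      intro h k hk
      apply ih ?_ k (by simpa using hk)
      intro m hm0 hmi hmlen
      rw [List.length_set] at hmlen
      rcases Nat.lt_or_ge m i with hmi' | hmi'
      · rw [getD_set_ne a i m _ (by omega), getD_set_ne a i (m - 1) _ (by omega)]
        exact h m hm0 hmi' hmlen
      · have hmeq : m = i := by omega
        subst hmeq
        rw [getD_set_self a m _ (by omega), getD_set_ne a m (m - 1) _ (by omega)]
        exact min_le_left _ _
  | case2 a i hlt =>
      intro h k hk
      have := h (k + 1) (by omega) (by omega) hk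
      simpa using this

-- the suffix-max array is adjacent-antitone
theorem bwdLoop_anti (a : List Int) (i : Int) :
    i ≤ (a.length : Int) - 2 →
    (∀ k : Nat, i < (k : Int) → k + 1 < a.length → a.getD (k + 1) 0 ≤ a.getD k 0) →
    ∀ k, k + 1 < a.length → (bwdLoop a i).getD (k + 1) 0 ≤ (bwdLoop a i).getD k 0 := by
  fun_induction bwdLoop a i with
  | case1 a i h0 ih =>
      intro hi h k hk
      apply ih ?_ ?_ k (by simpa using hk)
      · rw [List.length_set]; omega
      intro m hm hmlen
      rw [List.length_set] at hmlen
      rcases Nat.lt_or_ge i.toNat m with hm' | hm'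
      · rw [getD_set_ne a i.toNat (m + 1) _ (by omega), getD_set_ne a i.toNat m _ (by omega)]
        exact h m (by omega) hmlen
      · have hmeq : m = i.toNat := by omega
        rw [hmeq]
        rw [getD_set_self a i.toNat _ (by omega), getD_set_ne a i.toNat (i.toNat + 1) _ (by omega)]
        exact le_max_left _ _
  | case2 a i h0 =>
      intro hi h k hk
      exact h k (by omega) hk

-- chained antitone from adjacent antitone
theorem anti_chain (a : List Int)
    (h : ∀ k, k + 1 < a.length → a.getD (k + 1) 0 ≤ a.getD k 0) :
    ∀ p q, p ≤ q → q < a.length → a.getD q 0 ≤ a.getD p 0 := by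
  intro p q hpq hq
  induction q with
  | zero => have : p = 0 := by omega
            simp [this]
  | succ q ih =>
      rcases Nat.lt_or_ge p (q + 1) with hp | hp
      · exact le_trans (h q hq) (ih (by omega) (by omega))
      · have : p = q + 1 := by omega
        simp [this]

-- binary-search invariant
theorem bsearch_spec (ml : List Int) (v : Int) (j : Nat) (hj : j ≤ ml.length)
    (hanti : ∀ p q, p ≤ q → q < ml.length → ml.getD q 0 ≤ ml.getD p 0) :
    ∀ (n : Nat) lo hi, hi - lo ≤ n → lo ≤ hi → hi ≤ j →
      (∀ k, k < lo → ¬ ml.getD k 0 < v) →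
      (∀ k, hi ≤ k → k < j → ml.getD k 0 < v) →
      lo ≤ bsearch ml v lo hi ∧ bsearch ml v lo hi ≤ hi ∧
      (∀ k, k < bsearch ml v lo hi → ¬ ml.getD k 0 < v) ∧
      (∀ k, bsearch ml v lo hi ≤ k → k < j → ml.getD k 0 < v) := by
  intro n
  induction n with
  | zero =>
      intro lo hi hn hle hhj h1 h2
      have : ¬ lo < hi := by omega
      rw [bsearch, if_neg this]
      exact ⟨le_refl _, by omega, h1, fun k hk1 hk2 => h2 k (by omega) hk2⟩
  | succ n ih =>
      intro lo hi hn hle hhj h1 h2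
      by_cases hlt : lo < hi
      · rw [bsearch, if_pos hlt]
        simp only []
        by_cases hmid : ml.getD ((lo + hi) / 2) 0 < v
        · rw [if_pos hmid]
          have hrec := ih lo ((lo + hi) / 2) (by omega) (by omega) (by omega) h1
            (fun k hk1 hk2 => lt_of_le_of_lt (hanti _ k hk1 (by omega)) hmid)
          exact ⟨hrec.1, le_trans hrec.2.1 (by omega), hrec.2.2⟩
        · rw [if_neg hmid]
          refine (ih ((lo + hi) / 2 + 1) hi (by omega) (by omega) hhj ?_ h2).imp
            (fun h => by omega) (fun h => h)
          intro k hk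
          rcases Nat.lt_or_ge k lo with hk' | hk'
          · exact h1 k hk'
          · intro habs
            exact hmid (lt_of_le_of_lt (hanti k ((lo + hi) / 2) (by omega) (by omega)) habs)
      · rw [bsearch, if_neg hlt]
        exact ⟨le_refl _, by omega, h1, fun k hk1 hk2 => h2 k (by omega) hk2⟩

-- once the left pointer has run off the end, every remaining stepB is the identity
theorem foldl_stepB_id (ml mr : List Int) (hlen : ml.length = mr.length)
    (hanti : ∀ p q, p ≤ q → q < ml.length → ml.getD q 0 ≤ ml.getD p 0)
    (hmr : ∀ k, k + 1 < mr.length → mr.getD (k + 1) 0 ≤ mr.getD k 0) :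
    ∀ m j (st : Int × Option (Int × Int)), j + m ≤ mr.length →
      (∀ k, k < ml.length → ¬ ml.getD k 0 < mr.getD j 0) →
      (List.range' j m).foldl (stepB ml mr) st = st := by
  intro m
  induction m with
  | zero => intro j st _ _; rfl
  | succ m ih =>
      intro j st hjm hall
      rw [List.range'_succ, List.foldl_cons]
      have hstep : stepB ml mr st j = st := by
        have hs := bsearch_spec ml (mr.getD j 0) j (by omega) hanti j 0 j
          (by omega) (by omega) (le_refl _) (fun k hk => absurd hk (by omega))
          (fun k hk1 hk2 => by omega)
        have hr : bsearch ml (mr.getD j 0) 0 j = j := by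
          rcases Nat.lt_or_ge (bsearch ml (mr.getD j 0) 0 j) j with hr' | hr'
          · exact absurd (hs.2.2.2 _ (le_refl _) hr') (hall _ (by omega))
          · omega
        simp only [stepB, hr]
        rw [if_neg (by omega)]
      rw [hstep]
      rcases Nat.lt_or_ge (j + 1) mr.length with hj1 | hj1
      · apply ih (j + 1) st (by omega)
        intro k hk habs
        exact hall k hk (lt_of_lt_of_le habs (hmr j hj1))
      · have : m = 0 := by omega
        subst this
        rfl

-- the heart: A's two-pointer sweep equals B's per-j binary-search fold
theorem main_loop (lst ml mr : List Int)
    (hml : ml.length = lst.length) (hmr : mr.length = lst.length)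
    (hanti : ∀ p q, p ≤ q → q < ml.length → ml.getD q 0 ≤ ml.getD p 0)
    (hmra : ∀ k, k + 1 < mr.length → mr.getD (k + 1) 0 ≤ mr.getD k 0) :
    ∀ (N : Nat) i j mx (ind : Option (Int × Int)),
      (lst.length - i) + (lst.length - j) ≤ N → 0 ≤ mx →
      (j < lst.length → ∀ k, k < i → ¬ ml.getD k 0 < mr.getD j 0) →
      whileA lst ml mr i j mx ind =
        ((List.range' j (lst.length - j)).foldl (stepB ml mr) (mx, ind)).2 := by
  intro N
  induction N with
  | zero =>
      intro i j mx ind hN hmx h2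
      have hi : ¬ (i < lst.length ∧ j < lst.length) := by omega
      rw [whileA, if_neg hi]
      have : lst.length - j = 0 := by omega
      rw [this]
      rfl
  | succ N ih =>
      intro i j mx ind hN hmx h2
      by_cases hc : i < lst.length ∧ j < lst.length
      · rw [whileA, if_pos hc]
        -- B's step at j
        have hrange : lst.length - j = (lst.length - (j + 1)) + 1 := by omega
        rw [hrange, List.range'_succ, List.foldl_cons]
        have hs := bsearch_spec ml (mr.getD j 0) j (by omega) hanti j 0 j
          (by omega) (by omega) (le_refl _) (fun k hk => absurd hk (by omega))
          (fun k hk1 hk2 => by omega)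
        have h2' := h2 hc.2
        by_cases hp : ml.getD i 0 < mr.getD j 0
        · rw [if_pos hp]
          by_cases hij : i < j
          · -- bsearch finds exactly i
            have hr : bsearch ml (mr.getD j 0) 0 j = i := by
              rcases Nat.lt_trichotomy (bsearch ml (mr.getD j 0) 0 j) i with h' | h' | h'
              · exact absurd (hs.2.2.2 _ (le_refl _) (by omega)) (h2' _ h')
              · exact h'
              · exact absurd hp (hs.2.2.1 i h')
            have htrans : j + 1 < lst.length → ∀ k, k < i → ¬ ml.getD k 0 < mr.getD (j + 1) 0 := by
              intro hj1 k hk habs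
              exact h2' k hk (lt_of_lt_of_le habs (hmra j (by omega)))
            by_cases hw : ((j : Int) - (i : Int)) > mx
            · rw [if_pos hw]
              have := ih i (j + 1) ((j : Int) - (i : Int)) (some ((i : Int), (j : Int)))
                (by omega) (by omega) htrans
              rw [this]
              simp only [stepB, hr]
              rw [if_pos ⟨hij, hw⟩]
            · rw [if_neg hw]
              have := ih i (j + 1) mx ind (by omega) hmx htrans
              rw [this]
              simp only [stepB, hr]
              rw [if_neg (by simpa using fun _ => hw)]
          · -- i ≥ j : no record on either side
            have hr : bsearch ml (mr.getD j 0) 0 j = j := by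
              rcases Nat.lt_or_ge (bsearch ml (mr.getD j 0) 0 j) j with h' | h'
              · exact absurd (hs.2.2.2 _ (le_refl _) h') (h2' _ (by omega))
              · omega
            have hw : ¬ ((j : Int) - (i : Int)) > mx := by
              have : (j : Int) ≤ (i : Int) := by exact_mod_cast Nat.le_of_not_lt hij
              omega
            rw [if_neg hw]
            have htrans : j + 1 < lst.length → ∀ k, k < i → ¬ ml.getD k 0 < mr.getD (j + 1) 0 := by
              intro hj1 k hk habs
              exact h2' k hk (lt_of_lt_of_le habs (hmra j (by omega)))
            have := ih i (j + 1) mx ind (by omega) hmx htrans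
            rw [this]
            simp only [stepB, hr]
            rw [if_neg (by omega)]
        · rw [if_neg hp]
          have h2'' : j < lst.length → ∀ k, k < i + 1 → ¬ ml.getD k 0 < mr.getD j 0 := by
            intro hj k hk
            rcases Nat.lt_or_ge k i with hk' | hk'
            · exact h2' k hk'
            · have : k = i := by omega
              subst this
              exact hp
          have := ih (i + 1) j mx ind (by omega) hmx h2''
          rw [this, hrange, List.range'_succ, List.foldl_cons]
      · rw [whileA, if_neg hc]
        rcases Nat.lt_or_ge j lst.length with hj | hj
        · -- i has run off the end
          have := foldl_stepB_id ml mr (by omega) hanti hmra (lst.length - j) j (mx, ind)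
            (by omega) (fun k hk => h2 hj k (by omega))
          rw [this]
        · have : lst.length - j = 0 := by omega
          rw [this]
          rfl

-- ===== VERDICT (by name: the statement is the Claim_ definition above) =====
theorem solution_spec : Claim_equal_solution := by
  intro lst _
  unfold Spec_solution solution solution_alt
  have hml := fwdLoop_length lst 1
  have hmr := bwdLoop_length lst ((lst.length : Int) - 2)
  have hanti : ∀ p q, p ≤ q → q < (fwdLoop lst 1).length →
      (fwdLoop lst 1).getD q 0 ≤ (fwdLoop lst 1).getD p 0 := by
    apply anti_chain
    intro k hk
    exact fwdLoop_anti lst 1 (by intro k h0 h1 _; omega) k (by rwa [hml] at hk)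
  have hmra : ∀ k, k + 1 < (bwdLoop lst ((lst.length : Int) - 2)).length →
      (bwdLoop lst ((lst.length : Int) - 2)).getD (k + 1) 0 ≤
      (bwdLoop lst ((lst.length : Int) - 2)).getD k 0 := by
    intro k hk
    rw [bwdLoop_length] at hk
    exact bwdLoop_anti lst _ (by omega) (fun k hk1 hk2 => absurd hk2 (by omega)) k hk
  have := main_loop lst (fwdLoop lst 1) (bwdLoop lst ((lst.length : Int) - 2))
      hml hmr hanti hmra (2 * lst.length) 0 0 0 none (by omega) le_rfl
      (by intro _ k hk; omega)
  simp only [this, List.range_eq_range', Nat.sub_zero]
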